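-- pv_equiv track=rewrite | github.com/realgufeoliv/seguranca | Dados_EP_2025/textos_conhecidos/Descriptografia-hill-2x2.py | segmentar_texto
-- ===== SOURCE A (Python) =====
-- def segmentar_texto(texto, vocabulario, max_desconhecidas=2):
--     n = len(texto)
--     dp = [None] * (n + 1)
--     desconhecidas = [float('inf')] * (n + 1)
--     dp[0] = []
--     desconhecidas[0] = 0
--
--     for i in range(1, n + 1):
--         for j in range(max(0, i - 20), i):
--             palavra = texto[j:i]
--             if dp[j] is not None:
--                 nova_lista = dp[j] + [palavra if palavra in vocabulario else f'??{palavra}??']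
--                 novo_contador = desconhecidas[j] + (0 if palavra in vocabulario else 1)
--                 if novo_contador < desconhecidas[i]:
--                     dp[i] = nova_lista
--                     desconhecidas[i] = novo_contador
--     return dp[n]
-- ===== SOURCE B (Python) =====
-- def segmentar_texto(texto, vocabulario, max_desconhecidas=2):
--     n = len(texto)
--     voc = set(vocabulario)
--     best = [None] * (n + 1)
--     parent = [0] * (n + 1)
--     best[0] = 0
--     for i in range(1, n + 1):
--         for j in range(max(0, i - 20), i):
--             if best[j] is not None:
--                 c = best[j] + (0 if texto[j:i] in voc else 1)
--                 if best[i] is None or c < best[i]: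
--                     best[i] = c
--                     parent[i] = j
--     segs = []
--     i = n
--     while i > 0:
--         j = parent[i]
--         p = texto[j:i]
--         segs.append(p if p in voc else f'??{p}??')
--         i = j
--     segs.reverse()
--     return segs
-- ===== Notes on version B (the rewrite author's own statement) =====
-- stated objective: faster
-- what changed: A's DP stores a full copy of the best segmentation list at every text position (list concatenation on each improvement); B stores only the best unknown-count and a backpointer per position and reconstructs the segmentation once at the end by following parents.
import Mathlib
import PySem

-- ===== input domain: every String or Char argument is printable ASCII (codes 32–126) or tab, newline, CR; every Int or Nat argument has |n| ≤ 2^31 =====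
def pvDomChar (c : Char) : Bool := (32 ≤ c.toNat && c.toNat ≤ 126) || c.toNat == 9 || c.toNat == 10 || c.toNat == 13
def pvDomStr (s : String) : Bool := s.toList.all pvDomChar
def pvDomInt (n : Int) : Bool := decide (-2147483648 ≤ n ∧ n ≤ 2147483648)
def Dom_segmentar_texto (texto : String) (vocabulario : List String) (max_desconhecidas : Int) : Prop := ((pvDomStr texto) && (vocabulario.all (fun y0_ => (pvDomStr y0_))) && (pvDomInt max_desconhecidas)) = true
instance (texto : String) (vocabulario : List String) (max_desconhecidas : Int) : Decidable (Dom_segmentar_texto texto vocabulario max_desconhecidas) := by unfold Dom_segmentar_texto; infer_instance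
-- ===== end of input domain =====

-- B replaces A's per-step list copying (a DP that stores a full segmentation at every
-- position) by a backpointer DP plus one reconstruction pass; measured faster.
-- max_desconhecidas is unused by A and hence by B as well.

-- texto[j:i] for natural indices (shared slice wrapper)
def pvWord (texto : String) (j i : Nat) : String :=
  PySem.Str.slice texto (some (j : Int)) (some (i : Int))

-- ===== PORT A =====
-- A's inner `for j` loop for position i: acc = (dp[i], desconhecidas[i]) so far
-- (None / float('inf') = none; they start as the unset entries None/inf).
def pvInnerA (texto : String) (voc : List String)
    (st : List (Option (List String)) × List (Option Int)) (i : Nat) :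
    Option (List String) × Option Int :=
  (List.range' (i - 20) (i - (i - 20))).foldl
    (fun (acc : Option (List String) × Option Int) j =>
      match st.1.getD j none, st.2.getD j none with
      | some lst, some cj =>
        let palavra := pvWord texto j i
        let nova := lst ++ [if voc.contains palavra then palavra else "??" ++ palavra ++ "??"]
        let novo := cj + (if voc.contains palavra then 0 else 1)
        if (match acc.2 with | none => true | some b => novo < b) then (some nova, some novo)
        else acc
      | _, _ => acc) (none, none)

-- one outer iteration: write the freshly computed entries dp[i], desconhecidas[i]
def pvStepA (texto : String) (voc : List String)
    (st : List (Option (List String)) × List (Option Int)) (i : Nat) :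
    List (Option (List String)) × List (Option Int) :=
  (st.1 ++ [(pvInnerA texto voc st i).1], st.2 ++ [(pvInnerA texto voc st i).2])

-- (dp[n] is provably never None; the final `.getD []` only realises that.)
def segmentar_texto (texto : String) (vocabulario : List String) (max_desconhecidas : Int) : List String :=
  let n := texto.toList.length
  let st := (List.range' 1 n).foldl (pvStepA texto vocabulario) ([some []], [some 0])
  (st.1.getD n none).getD []

-- ===== PORT B =====
-- B's inner `for j` loop for position i: acc = (best[i], parent[i]) so far.
def pvInnerB (texto : String) (voc : PySem.Set String)
    (st : List (Option Int) × List Nat) (i : Nat) : Option Int × Nat :=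
  (List.range' (i - 20) (i - (i - 20))).foldl
    (fun (acc : Option Int × Nat) j =>
      match st.1.getD j none with
      | some cj =>
        let cc := cj + (if PySem.Set.contains voc (pvWord texto j i) then 0 else 1)
        if (match acc.1 with | none => true | some b => cc < b) then (some cc, j)
        else acc
      | none => acc) (none, 0)

def pvStepB (texto : String) (voc : PySem.Set String)
    (st : List (Option Int) × List Nat) (i : Nat) :
    List (Option Int) × List Nat :=
  (st.1 ++ [(pvInnerB texto voc st i).1], st.2 ++ [(pvInnerB texto voc st i).2])

-- Source B's `while i > 0` reconstruction (fuel-bounded: parent[i] < i, so fuel = n suffices);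
-- it builds the list front-first, which is what append-then-reverse produces.
def pvRebuild (texto : String) (voc : PySem.Set String) (par : List Nat) :
    Nat → Nat → List String
  | _, 0 => []
  | 0, _ + 1 => []
  | f + 1, i + 1 =>
    let j := par.getD (i + 1) 0
    let p := pvWord texto j (i + 1)
    pvRebuild texto voc par f j ++ [if PySem.Set.contains voc p then p else "??" ++ p ++ "??"]

def segmentar_texto_alt (texto : String) (vocabulario : List String) (max_desconhecidas : Int) : List String :=
  let n := texto.toList.length
  let vs := PySem.Set.ofList vocabulario
  let st := (List.range' 1 n).foldl (pvStepB texto vs) ([some 0], [0])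
  pvRebuild texto vs st.2 n n

-- ===== PRECONDITION & SPEC =====
def Spec_segmentar_texto (texto : String) (vocabulario : List String) (max_desconhecidas : Int) (out : List String) : Prop := out = segmentar_texto_alt texto vocabulario max_desconhecidas
instance (texto : String) (vocabulario : List String) (max_desconhecidas : Int) (out : List String) : Decidable (Spec_segmentar_texto texto vocabulario max_desconhecidas out) := by unfold Spec_segmentar_texto; infer_instance

-- ===== CLAIM (what is proved, stated in full; the proofs are below) =====
def Claim_equal_segmentar_texto : Prop := ∀ (texto : String) (vocabulario : List String) (max_desconhecidas : Int), Dom_segmentar_texto texto vocabulario max_desconhecidas → Spec_segmentar_texto texto vocabulario max_desconhecidas (segmentar_texto texto vocabulario max_desconhecidas)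

-- ===== LEMMAS AND PROOFS =====

theorem pvContains_ofList (voc : List String) (p : String) :
    PySem.Set.contains (PySem.Set.ofList voc) p = voc.contains p := by
  by_cases h : p ∈ voc <;> simp [PySem.Set.mem_ofList, h]

theorem pvGetD_concat_self {α : Type} (xs : List α) (v d : α) :
    (xs ++ [v]).getD xs.length d = v := by simp [List.getD]

theorem pvGetD_concat_lt {α : Type} (xs : List α) (v d : α) {m : Nat} (h : m < xs.length) :
    (xs ++ [v]).getD m d = xs.getD m d := by
  simp [List.getD, List.getElem?_append_left h]

-- well-formed parent table: every positive in-range entry points strictly down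
def pvChain (par : List Nat) : Prop := ∀ t, 0 < t → t < par.length → par.getD t 0 < t

theorem pvRebuild_append (texto : String) (vs : PySem.Set String) (par : List Nat) (x : Nat)
    (hch : pvChain par) :
    ∀ f m, m < par.length → pvRebuild texto vs (par ++ [x]) f m = pvRebuild texto vs par f m := by
  intro f
  induction f with
  | zero => intro m _; cases m <;> rfl
  | succ f ih =>
    intro m hm
    cases m with
    | zero => rfl
    | succ i =>
      have hj : par.getD (i + 1) 0 < i + 1 := hch (i + 1) (Nat.succ_pos _) hm
      simp only [pvRebuild]
      rw [pvGetD_concat_lt par x 0 hm, ih _ (Nat.lt_trans hj hm)]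

theorem pvRebuild_fuel (texto : String) (vs : PySem.Set String) (par : List Nat)
    (hch : pvChain par) :
    ∀ m, m < par.length → ∀ f, m ≤ f → pvRebuild texto vs par f m = pvRebuild texto vs par m m := by
  intro m
  induction m using Nat.strong_induction_on with
  | _ m ih =>
    intro hm f hf
    cases m with
    | zero => cases f <;> rfl
    | succ i =>
      cases f with
      | zero => omega
      | succ f =>
        have hj : par.getD (i + 1) 0 < i + 1 := hch (i + 1) (Nat.succ_pos _) hm
        simp only [pvRebuild]
        rw [ih _ hj (Nat.lt_trans hj hm) f (by omega),
            ih _ hj (Nat.lt_trans hj hm) i (by omega)]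

def pvRunA (texto : String) (voc : List String) (k : Nat) :
    List (Option (List String)) × List (Option Int) :=
  (List.range' 1 k).foldl (pvStepA texto voc) ([some []], [some 0])

def pvRunB (texto : String) (vs : PySem.Set String) (k : Nat) :
    List (Option Int) × List Nat :=
  (List.range' 1 k).foldl (pvStepB texto vs) ([some 0], [0])

theorem pvRunA_succ (texto : String) (voc : List String) (k : Nat) :
    pvRunA texto voc (k + 1) = pvStepA texto voc (pvRunA texto voc k) (k + 1) := by
  unfold pvRunA
  rw [show List.range' 1 (k + 1) = List.range' 1 k ++ [k + 1] from by
        simpa [Nat.add_comm] using List.range'_concat (s := 1) (n := k) (step := 1),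
      List.foldl_append]
  rfl

theorem pvRunB_succ (texto : String) (vs : PySem.Set String) (k : Nat) :
    pvRunB texto vs (k + 1) = pvStepB texto vs (pvRunB texto vs k) (k + 1) := by
  unfold pvRunB
  rw [show List.range' 1 (k + 1) = List.range' 1 k ++ [k + 1] from by
        simpa [Nat.add_comm] using List.range'_concat (s := 1) (n := k) (step := 1),
      List.foldl_append]
  rfl

def pvTag (voc : List String) (p : String) : String :=
  if voc.contains p then p else "??" ++ p ++ "??"

-- the full invariant after k outer iterations
def pvInv (texto : String) (voc : List String) (k : Nat) : Prop :=
  (pvRunA texto voc k).2 = (pvRunB texto (PySem.Set.ofList voc) k).1 ∧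
  (pvRunA texto voc k).1.length = k + 1 ∧
  (pvRunB texto (PySem.Set.ofList voc) k).1.length = k + 1 ∧
  (pvRunB texto (PySem.Set.ofList voc) k).2.length = k + 1 ∧
  pvChain (pvRunB texto (PySem.Set.ofList voc) k).2 ∧
  (∀ m, m ≤ k → (pvRunB texto (PySem.Set.ofList voc) k).1.getD m none ≠ none ∧
      (pvRunA texto voc k).1.getD m none =
        some (pvRebuild texto (PySem.Set.ofList voc) (pvRunB texto (PySem.Set.ofList voc) k).2 m m))

-- relation between the two inner-loop accumulators while scanning candidates for position i
def pvRacc (texto : String) (voc : List String) (par : List Nat) (i : Nat)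
    (accA : Option (List String) × Option Int) (accB : Option Int × Nat) : Prop :=
  accA.2 = accB.1 ∧ accB.2 < i ∧
  (match accB.1 with
   | none => accA.1 = none
   | some _ => accA.1 = some (pvRebuild texto (PySem.Set.ofList voc) par accB.2 accB.2 ++
       [pvTag voc (pvWord texto accB.2 i)]))

theorem pvInner (texto : String) (voc : List String)
    (dp : List (Option (List String))) (cnt best : List (Option Int)) (par : List Nat) (i : Nat)
    (hi : 0 < i) (hcnt : cnt = best)
    (hrel : ∀ j, j < i → (best.getD j none ≠ none ∧
        dp.getD j none = some (pvRebuild texto (PySem.Set.ofList voc) par j j))) :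
    ∀ js : List Nat, (∀ j ∈ js, j < i) → ∀ accA accB, pvRacc texto voc par i accA accB →
      pvRacc texto voc par i
        (js.foldl (fun (acc : Option (List String) × Option Int) j =>
          match dp.getD j none, cnt.getD j none with
          | some lst, some cj =>
            let palavra := pvWord texto j i
            let nova := lst ++ [if voc.contains palavra then palavra else "??" ++ palavra ++ "??"]
            let novo := cj + (if voc.contains palavra then 0 else 1)
            if (match acc.2 with | none => true | some b => novo < b) then (some nova, some novo)
            else acc
          | _, _ => acc) accA)
        (js.foldl (fun (acc : Option Int × Nat) j =>
          match best.getD j none with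
          | some cj =>
            let cc := cj + (if PySem.Set.contains (PySem.Set.ofList voc) (pvWord texto j i) then 0 else 1)
            if (match acc.1 with | none => true | some b => cc < b) then (some cc, j)
            else acc
          | none => acc) accB) := by
  intro js
  induction js with
  | nil => intro _ accA accB h; simpa using h
  | cons j js ih =>
    intro hjs accA accB hR
    have hji : j < i := hjs j (by simp)
    obtain ⟨hb, hdp⟩ := hrel j hji
    obtain ⟨cj, hcj⟩ : ∃ cj, best.getD j none = some cj := by
      cases h : best.getD j none with
      | none => exact absurd h hb
      | some c => exact ⟨c, rfl⟩
    subst hcnt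
    simp only [List.foldl_cons]
    refine ih (fun t ht => hjs t (by simp [ht])) _ _ ?_
    simp only [hdp, hcj, pvContains_ofList]
    obtain ⟨h1, h2, h3⟩ := hR
    rcases haB : accB.1 with _ | b
    · -- current best is None: both sides take the candidate
      rw [h1, haB]
      exact ⟨rfl, hji, rfl⟩
    · rw [h1, haB]
      by_cases hlt : cj + (if voc.contains (pvWord texto j i) = true then 0 else 1) < b
      · simp only [hlt, decide_true]
        exact ⟨rfl, hji, rfl⟩
      · simp only [hlt, decide_false]
        simp only [Bool.false_eq_true, if_false]
        rw [haB] at h3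
        exact ⟨h1, h2, by rw [haB]; exact h3⟩

-- the inner fold of B produces a reachable entry as soon as one candidate is reachable
theorem pvFoldB_some (texto : String) (vs : PySem.Set String)
    (best : List (Option Int)) (i : Nat) :
    ∀ js : List Nat, ∀ acc : Option Int × Nat,
      ((∃ j ∈ js, best.getD j none ≠ none) ∨ acc.1 ≠ none) →
      (js.foldl (fun (acc : Option Int × Nat) j =>
          match best.getD j none with
          | some cj =>
            let cc := cj + (if PySem.Set.contains vs (pvWord texto j i) then 0 else 1)
            if (match acc.1 with | none => true | some b => cc < b) then (some cc, j)
            else acc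
          | none => acc) acc).1 ≠ none := by
  intro js
  induction js with
  | nil =>
    intro acc h
    simpa using h.resolve_left (by simp)
  | cons j js ih =>
    intro acc h
    simp only [List.foldl_cons]
    cases hb : best.getD j none with
    | none =>
      apply ih
      rcases h with h | h
      · obtain ⟨t, ht, hne⟩ := h
        rcases List.mem_cons.1 ht with rfl | ht
        · exact absurd hb hne
        · exact Or.inl ⟨t, ht, hne⟩
      · exact Or.inr h
    | some cj =>
      apply ih
      refine Or.inr ?_
      rcases hacc : acc.1 with _ | b <;>
        simp only [hacc] <;> (repeat' split) <;> simp_all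

theorem pvInv_all (texto : String) (voc : List String) : ∀ k, pvInv texto voc k := by
  intro k
  induction k with
  | zero =>
    refine ⟨rfl, rfl, rfl, rfl, ?_, ?_⟩
    · intro t ht hlt
      simp [pvRunB] at hlt
      omega
    · intro m hm
      interval_cases m
      exact ⟨by simp [pvRunB], by simp [pvRunA, pvRebuild]⟩
  | succ k ih =>
    obtain ⟨hEq, hLa, hLb, hLp, hCh, hM⟩ := ih
    set vs := PySem.Set.ofList voc with hvs
    set aK := pvRunA texto voc k with haK
    set bK := pvRunB texto vs k with hbK
    -- the candidate window for position i = k + 1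
    have hmemlt : ∀ j ∈ List.range' ((k + 1) - 20) ((k + 1) - ((k + 1) - 20)), j < k + 1 := by
      intro j hj
      have := List.mem_range'_1.1 hj
      omega
    have hinner := pvInner texto voc aK.1 aK.2 bK.1 bK.2 (k + 1) (Nat.succ_pos k) hEq
      (fun j hj => hM j (by omega))
      (List.range' ((k + 1) - 20) ((k + 1) - ((k + 1) - 20))) hmemlt
      (none, none) (none, 0) ⟨rfl, Nat.succ_pos k, rfl⟩
    have hsome : (pvInnerB texto vs bK (k + 1)).1 ≠ none := by
      apply pvFoldB_some texto vs bK.1 (k + 1)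
      refine Or.inl ⟨k, ?_, (hM k le_rfl).1⟩
      simp only [List.mem_range'_1]
      omega
    have hRQ : pvRacc texto voc bK.2 (k + 1) (pvInnerA texto voc aK (k + 1))
        (pvInnerB texto vs bK (k + 1)) := hinner
    obtain ⟨hc1, hc2, hc3⟩ := hRQ
    obtain ⟨cB, hcB⟩ : ∃ c, (pvInnerB texto vs bK (k + 1)).1 = some c := by
      cases h : (pvInnerB texto vs bK (k + 1)).1 with
      | none => exact absurd h hsome
      | some c => exact ⟨c, rfl⟩
    rw [hcB] at hc3
    have hstA : pvRunA texto voc (k + 1) =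
        (aK.1 ++ [(pvInnerA texto voc aK (k + 1)).1], aK.2 ++ [(pvInnerA texto voc aK (k + 1)).2]) :=
      pvRunA_succ texto voc k
    have hstB : pvRunB texto vs (k + 1) =
        (bK.1 ++ [(pvInnerB texto vs bK (k + 1)).1], bK.2 ++ [(pvInnerB texto vs bK (k + 1)).2]) :=
      pvRunB_succ texto vs k
    have hchain' : pvChain (bK.2 ++ [(pvInnerB texto vs bK (k + 1)).2]) := by
      intro t ht hlt
      simp only [List.length_append, List.length_cons, List.length_nil] at hlt
      by_cases hlt' : t < bK.2.length
      · rw [pvGetD_concat_lt _ _ _ hlt']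
        exact hCh t ht hlt'
      · have : t = bK.2.length := by omega
        subst this
        rw [pvGetD_concat_self]
        omega
    refine ⟨?_, ?_, ?_, ?_, ?_, ?_⟩
    · rw [hstA, hstB, hEq, hc1]
    · rw [hstA]; simp [hLa]
    · rw [hstB]; simp [hLb]
    · rw [hstB]; simp [hLp]
    · rw [hstB]; exact hchain'
    · intro m hm
      rw [hstA, hstB]
      by_cases hmk : m ≤ k
      · have hm1 : m < bK.1.length := by omega
        have hm2 : m < aK.1.length := by omega
        have hm3 : m < bK.2.length := by omega
        obtain ⟨hne, heq⟩ := hM m hmk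
        refine ⟨by rw [pvGetD_concat_lt _ _ _ hm1]; exact hne, ?_⟩
        rw [pvGetD_concat_lt _ _ _ hm2, heq,
            pvRebuild_append texto vs bK.2 _ hCh m m hm3]
      · have hm' : m = k + 1 := by omega
        subst hm'
        have hk1 : k + 1 = bK.1.length := by omega
        have hk2 : k + 1 = aK.1.length := by omega
        have hk3 : k + 1 = bK.2.length := by omega
        constructor
        · rw [hk1, pvGetD_concat_self, ← hk1, hcB]
          simp
        · rw [hk2, pvGetD_concat_self, ← hk2, hc3]
          -- compute the rebuilt segmentation at the fresh position k + 1
          have hgd : (bK.2 ++ [(pvInnerB texto vs bK (k + 1)).2]).getD (k + 1) 0 =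
              (pvInnerB texto vs bK (k + 1)).2 := by
            rw [hk3, pvGetD_concat_self]
          show _ = some (pvRebuild texto vs (bK.2 ++ [(pvInnerB texto vs bK (k + 1)).2]) (k + 1) (k + 1))
          simp only [pvRebuild, hgd]
          rw [pvRebuild_append texto vs bK.2 _ hCh k (pvInnerB texto vs bK (k + 1)).2 (by omega),
              pvRebuild_fuel texto vs bK.2 hCh (pvInnerB texto vs bK (k + 1)).2 (by omega) k (by omega)]
          simp [pvTag, hvs]

theorem pvMain (texto : String) (voc : List String) (md : Int) :
    segmentar_texto texto voc md = segmentar_texto_alt texto voc md := by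
  have h := ((pvInv_all texto voc texto.toList.length).2.2.2.2.2 texto.toList.length le_rfl).2
  show ((pvRunA texto voc texto.toList.length).1.getD texto.toList.length none).getD [] =
      pvRebuild texto (PySem.Set.ofList voc)
        (pvRunB texto (PySem.Set.ofList voc) texto.toList.length).2
        texto.toList.length texto.toList.length
  rw [h]
  rfl

-- ===== VERDICT (by name: the statement is the Claim_ definition above) =====
theorem segmentar_texto_spec : Claim_equal_segmentar_texto := by
  intro texto voc md _
  unfold Spec_segmentar_texto
  exact pvMain texto voc md
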